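-- pv_equiv track=rewrite | github.com/xmobg/PycharmProjects | Uroci/word_length_counter.py | word_length_counter
-- ===== SOURCE A (Python) =====
-- def word_length_counter(words):
--     result = {}
--
--     for word in words:
--         length = len(word)
--         if length not in result:
--             result[length] = []
--         result[length].append(word)
--
--     return result
-- ===== SOURCE B (Python) =====
-- def word_length_counter(words):
--     lengths = list(dict.fromkeys(map(len, words)))
--     return {l: [w for w in words if len(w) == l] for l in lengths}
-- ===== Notes on version B (the rewrite author's own statement) =====
-- stated objective: alternative
-- what changed: Replaces the single mutating dict-accumulation pass with a two-phase comprehension: an ordered dedup of the lengths (dict.fromkeys) followed by a dict comprehension that filters the word list per length.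
import Mathlib
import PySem

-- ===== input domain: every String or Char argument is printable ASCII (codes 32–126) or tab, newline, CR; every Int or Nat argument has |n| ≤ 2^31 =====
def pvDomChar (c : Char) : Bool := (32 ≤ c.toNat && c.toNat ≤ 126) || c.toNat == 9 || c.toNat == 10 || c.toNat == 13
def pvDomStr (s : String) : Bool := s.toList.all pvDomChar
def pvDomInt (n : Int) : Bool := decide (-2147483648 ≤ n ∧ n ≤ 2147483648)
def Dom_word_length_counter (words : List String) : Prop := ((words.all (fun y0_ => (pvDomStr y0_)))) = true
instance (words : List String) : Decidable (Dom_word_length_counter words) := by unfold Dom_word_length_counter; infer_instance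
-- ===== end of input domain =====

-- B builds the result by an ordered dedup of the lengths then a per-length filter, instead of A's
-- single mutating dict-accumulation pass; same cost class, different decomposition.

-- ===== PORT A =====
-- result = {}; for word in words: length = len(word); if length not in result: result[length] = [];
-- result[length].append(word); return result
def word_length_counter (words : List String) : List (Int × List String) :=
  (words.foldl
    (fun (result : PySem.Dict Int (List String)) (word : String) =>
      let length : Int := PySem.Str.len word
      let result := if (result.get? length).isNone then result.insert length [] else result
      result.modify length [] (fun xs => xs ++ [word]))
    PySem.Dict.empty).items

-- ===== PORT B =====
-- lengths = list(dict.fromkeys(map(len, words))); {l: [w for w in words if len(w) == l] for l in lengths}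
def word_length_counter_alt (words : List String) : List (Int × List String) :=
  (PySem.List.dedup (words.map (fun w => (PySem.Str.len w : Int)))).map
    (fun l => (l, words.filter (fun w => PySem.Str.len w == l)))

-- ===== PRECONDITION & SPEC =====
def Spec_word_length_counter (words : List String) (out : List (Int × List String)) : Prop := out = word_length_counter_alt words
instance (words : List String) (out : List (Int × List String)) : Decidable (Spec_word_length_counter words out) := by unfold Spec_word_length_counter; infer_instance

-- ===== CLAIM (what is proved, stated in full; the proofs are below) =====
def Claim_equal_word_length_counter : Prop := ∀ (words : List String), Dom_word_length_counter words → Spec_word_length_counter words (word_length_counter words)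

-- ===== LEMMAS AND PROOFS =====

-- A's loop body (insert-if-absent then append) is exactly a modify with default [].
theorem pv_step_eq (d : PySem.Dict Int (List String)) (w : String) :
    (let length : Int := PySem.Str.len w
     let d' := if (d.get? length).isNone then d.insert length [] else d
     d'.modify length [] (fun xs => xs ++ [w]))
    = d.modify (PySem.Str.len w) [] (fun xs => xs ++ [w]) := by
  simp only [PySem.Str.len_eq, PySem.Dict.modify]
  by_cases h : d.get? ((w.length : Int)) = none
  · rw [if_pos (by simp [h]), PySem.Dict.getD_insert_self,
      PySem.Dict.insert_insert_self]
    simp [PySem.Dict.getD_eq_get?_getD, h]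
  · rw [if_neg (by simp [h])]

-- the folded dict, as a fold over (length, word) pairs keyed on the first component
theorem pv_fold_eq (words : List String) :
    words.foldl
      (fun (result : PySem.Dict Int (List String)) (word : String) =>
        let length : Int := PySem.Str.len word
        let result := if (result.get? length).isNone then result.insert length [] else result
        result.modify length [] (fun xs => xs ++ [word]))
      PySem.Dict.empty
    = (words.map (fun w => ((PySem.Str.len w : Int), w))).foldl
        (fun d p => d.modify p.1 [] (fun xs => xs ++ [p.2])) PySem.Dict.empty := by
  rw [List.foldl_map]
  apply PySem.List.foldl_congr_mem
  exact fun d w _ => pv_step_eq d w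

-- ===== VERDICT (by name: the statement is the Claim_ definition above) =====
theorem word_length_counter_spec : Claim_equal_word_length_counter := by
  intro words _
  unfold Spec_word_length_counter word_length_counter word_length_counter_alt
  rw [pv_fold_eq]
  set l := words.map (fun w => ((PySem.Str.len w : Int), w)) with hl
  set D := l.foldl (fun d p => d.modify p.1 [] (fun xs => xs ++ [p.2])) PySem.Dict.empty with hD
  have hnd : D.keys.Nodup := by
    rw [hD]
    exact PySem.Dict.nodup_keys_foldl_modify_key l (·.1) [] (fun d p xs => xs ++ [p.2])
      PySem.Dict.empty (by simp [PySem.Dict.keys_empty])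
  rw [PySem.Dict.items_eq_map_keys D hnd []]
  have hkeys : D.keys = PySem.List.dedup (words.map (fun w => (PySem.Str.len w : Int))) := by
    rw [hD, PySem.Dict.keys_foldl_modify_key]
    simp [PySem.Dict.keys_empty, PySem.Set.update_nil_left, hl, List.map_map]
    rfl
  rw [hkeys]
  apply List.map_congr_left
  intro k _
  have hget : D.getD k [] = words.filter (fun w => PySem.Str.len w == k) := by
    rw [hD, PySem.Dict.getD_foldl_modify_append]
    simp [hl, List.filter_map, Function.comp_def]
  rw [hget]
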